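-- pv_equiv track=rewrite | github.com/WeiChengLiou/console-2048 | console2048.py | push_all_columns
-- ===== SOURCE A (Python) =====
-- def push_row(row, left=True):
--     """Push all tiles in one row; like tiles will be merged together."""
--     r = 0
--     row = row[:] if left else row[::-1]
--     new_row = [item for item in row if item]
--     for i in range(len(new_row)-1):
--         if new_row[i] and new_row[i] == new_row[i+1]:
--             r += new_row[i] * 2
--             new_row[i], new_row[i+1:] = new_row[i]*2, new_row[i+2:]+[0]
--     new_row += [0]*(len(row)-len(new_row))
--     return (new_row if left else new_row[::-1]), r
--
-- def get_column(grid, column_index):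
--     """Return the column from the grid at column_index  as a list."""
--     return [row[column_index] for row in grid]
--
-- def set_column(grid, column_index, new):
--     """
--     Replace the values in the grid at column_index with the values in new.
--     The grid is changed inplace.
--     """
--     for i,row in enumerate(grid):
--         row[column_index] = new[i]
--
-- def push_all_columns(grid, up=True):
--     """
--     Perform a vertical shift on all columns.
--     Pass up=True for up and up=False for down.
--     The grid will be changed inplace.
--     """
--     r = 0
--     for i,val in enumerate(grid[0]):
--         column = get_column(grid, i)
--         new, r_ = push_row(column, up)
--         r += r_
--         set_column(grid, i, new)
--     return r
-- ===== SOURCE B (Python) =====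
-- def push_all_columns(grid, up=True):
--     """
--     Perform a vertical shift on all columns (2048 push).
--     One linear two-pointer greedy pass per column; the grid is changed inplace.
--     Pass up=True for up and up=False for down.
--     """
--     score = 0
--     height = len(grid)
--     for c in range(len(grid[0])):
--         vals = [row[c] for row in grid]
--         if not up:
--             vals.reverse()
--         nz = [v for v in vals if v]
--         n = len(nz)
--         out = []
--         i = 0
--         while i < n:
--             v = nz[i]
--             if i + 1 < n and v == nz[i + 1]:
--                 v += v
--                 score += v
--                 i += 2
--             else:
--                 i += 1
--             out.append(v)
--         out += [0] * (height - len(out))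
--         if not up:
--             out.reverse()
--         for r in range(height):
--             grid[r][c] = out[r]
--     return score
-- ===== Notes on version B (the rewrite author's own statement) =====
-- stated objective: alternative
-- what changed: Replaces push_row's index loop with repeated slice-reassignments (list surgery on every merge) by a single two-pointer greedy pass over the nonzero tiles of each column; per column this is one linear scan instead of a rescan-and-shift per merge (much faster on tall columns, comparable on flat grids).
import Mathlib
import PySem

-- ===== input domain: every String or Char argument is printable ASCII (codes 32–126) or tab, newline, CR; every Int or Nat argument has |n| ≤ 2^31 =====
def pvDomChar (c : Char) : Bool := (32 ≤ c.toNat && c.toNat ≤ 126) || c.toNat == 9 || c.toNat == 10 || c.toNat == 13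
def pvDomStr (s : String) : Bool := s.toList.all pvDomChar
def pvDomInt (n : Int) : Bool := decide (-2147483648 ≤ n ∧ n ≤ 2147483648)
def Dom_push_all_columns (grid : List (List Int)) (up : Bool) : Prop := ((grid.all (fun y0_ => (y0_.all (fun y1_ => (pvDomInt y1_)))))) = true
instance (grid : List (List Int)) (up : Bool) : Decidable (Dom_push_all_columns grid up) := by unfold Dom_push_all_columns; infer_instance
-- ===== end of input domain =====

-- B replaces A's per-column slice-surgery merge loop by a single two-pointer greedy pass;
-- equivalence is about the RETURN value (the score); both Pythons mutate the grid identically in place.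

-- ===== PORT A =====

-- push_row's for-loop body: i-th step of `for i in range(len(new_row)-1)` over state (new_row, r)
def stepA (st : List Int × Int) (i : Nat) : List Int × Int :=
  let vi := st.1.getD i 0
  if vi ≠ 0 ∧ vi = st.1.getD (i + 1) 0 then
    (st.1.take i ++ [vi * 2] ++ (st.1.drop (i + 2) ++ [0]), st.2 + vi * 2)
  else st

-- push_row(row, left)
def pushRowA (row : List Int) (left : Bool) : List Int × Int :=
  let row := if left then row else row.reverse
  let newRow := row.filter (· != 0)
  let st := (List.range (newRow.length - 1)).foldl stepA (newRow, 0)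
  let nr := st.1 ++ List.replicate (row.length - st.1.length) 0
  ((if left then nr else nr.reverse), st.2)

-- get_column(grid, i)
def getColumnA (grid : List (List Int)) (i : Nat) : List Int :=
  grid.map (fun row => row.getD i 0)

-- set_column(grid, i, new)  (in-place update, threaded functionally)
def setColumnA (grid : List (List Int)) (i : Nat) (new : List Int) : List (List Int) :=
  grid.mapIdx (fun r row => row.set i (new.getD r 0))

def push_all_columns (grid : List (List Int)) (up : Bool) : Int :=
  ((List.range grid.headI.length).foldl
    (fun (st : List (List Int) × Int) i =>
      let column := getColumnA st.1 i
      let nr := pushRowA column up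
      (setColumnA st.1 i nr.1, st.2 + nr.2))
    (grid, 0)).2

-- ===== PORT B =====

-- B's while-loop: two-pointer greedy merge over the nonzero tiles, as structural recursion
def mergeB : List Int → List Int × Int
  | [] => ([], 0)
  | [x] => ([x], 0)
  | x :: y :: t =>
    if x = y then
      let m := mergeB t
      (x * 2 :: m.1, m.2 + x * 2)
    else
      let m := mergeB (y :: t)
      (x :: m.1, m.2)

def push_all_columns_alt (grid : List (List Int)) (up : Bool) : Int :=
  ((List.range grid.headI.length).foldl
    (fun (st : List (List Int) × Int) c =>
      let vals := st.1.map (fun row => row.getD c 0)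
      let vals := if up then vals else vals.reverse
      let nz := vals.filter (· != 0)
      let m := mergeB nz
      let out := m.1 ++ List.replicate (st.1.length - m.1.length) 0
      let out := if up then out else out.reverse
      (st.1.mapIdx (fun r row => row.set c (out.getD r 0)), st.2 + m.2))
    (grid, 0)).2

-- ===== PRECONDITION & SPEC =====
-- Pre_ excludes exactly the inputs where the Python A raises: the empty grid (grid[0] is an
-- IndexError) and ragged grids with a row shorter than row 0 (IndexError in get_/set_column).
def Pre_push_all_columns (grid : List (List Int)) (up : Bool) : Prop :=
  grid ≠ [] ∧ ∀ row ∈ grid, grid.headI.length ≤ row.length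
instance (grid : List (List Int)) (up : Bool) : Decidable (Pre_push_all_columns grid up) := by
  unfold Pre_push_all_columns; infer_instance

def pvWitness_push_all_columns : List (List Int) × Bool := ([[2, 2], [2, 0]], true)

def Spec_push_all_columns (grid : List (List Int)) (up : Bool) (out : Int) : Prop := out = push_all_columns_alt grid up
instance (grid : List (List Int)) (up : Bool) (out : Int) : Decidable (Spec_push_all_columns grid up out) := by unfold Spec_push_all_columns; infer_instance

-- ===== CLAIM (what is proved, stated in full; the proofs are below) =====
def Claim_equal_push_all_columns : Prop := ∀ (grid : List (List Int)) (up : Bool), Dom_push_all_columns grid up → Pre_push_all_columns grid up → Spec_push_all_columns grid up (push_all_columns grid up)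

-- ===== LEMMAS AND PROOFS =====

-- indices whose current entry is 0 leave the state of A's loop unchanged
lemma stepA_zeros (l : List Nat) (st : List Int × Int)
    (h : ∀ i ∈ l, st.1.getD i 0 = 0) : l.foldl stepA st = st := by
  induction l with
  | nil => rfl
  | cons a t ih =>
    have ha : st.1[a]?.getD 0 = 0 := by
      rw [← List.getD_eq_getElem?_getD]; exact h a (by simp)
    have hst : stepA st a = st := by simp [stepA, ha]
    rw [List.foldl_cons, hst]
    exact ih (fun i hi => h i (by simp [hi]))

lemma getD_append_zeros (done : List Int) (z : Nat) (i : Nat) (hi : done.length ≤ i) :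
    (done ++ List.replicate z 0).getD i 0 = 0 := by
  rcases Nat.lt_or_ge i (done.length + z) with h | h
  · rw [List.getD_eq_getElem?_getD, List.getElem?_append_right hi, List.getElem?_replicate]
    split <;> rfl
  · rw [List.getD_eq_getElem?_getD, List.getElem?_eq_none (by simp; omega)]
    rfl

-- core invariant of A's merge loop: starting from done ++ rest ++ zeros with the cursor at
-- |done|, the remaining iterations compute exactly the two-pointer greedy merge of rest
lemma stepA_loop (rest : List Int) : ∀ (done : List Int) (z : Nat) (r : Int),
    (∀ x ∈ rest, x ≠ 0) →
    (List.range' done.length (rest.length + z - 1)).foldl stepA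
        (done ++ rest ++ List.replicate z 0, r)
      = (done ++ (mergeB rest).1
            ++ List.replicate (rest.length + z - (mergeB rest).1.length) 0,
         r + (mergeB rest).2) := by
  induction rest using mergeB.induct with
  | case1 =>
    intro done z r _
    rw [stepA_zeros _ _ (fun i hi => by
      have hge : done.length ≤ i := by
        have := List.mem_range'.mp hi; omega
      simpa using getD_append_zeros done z i hge)]
    simp [mergeB]
  | case2 x =>
    intro done z r hnz
    have hx : x ≠ 0 := hnz x (by simp)
    cases z with
    | zero => simp [mergeB]
    | succ z' =>
      have hc : ([x] : List Int).length + (z' + 1) - 1 = z' + 1 := by simp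
      rw [hc, List.range'_succ, List.foldl_cons]
      have hvi : ((done ++ [x] ++ List.replicate (z' + 1) 0).getD done.length 0) = x := by
        rw [List.getD_eq_getElem?_getD, List.append_assoc,
            List.getElem?_append_right (le_refl _)]
        simp
      have hvj : ((done ++ [x] ++ List.replicate (z' + 1) 0).getD (done.length + 1) 0) = 0 := by
        have he : done ++ [x] ++ List.replicate (z' + 1) 0
            = (done ++ [x]) ++ List.replicate (z' + 1) 0 := by simp
        rw [he]
        exact getD_append_zeros (done ++ [x]) (z' + 1) (done.length + 1) (by simp)
      rw [List.getD_eq_getElem?_getD] at hvi hvj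
      have hstep : stepA (done ++ [x] ++ List.replicate (z' + 1) 0, r) done.length
          = (done ++ [x] ++ List.replicate (z' + 1) 0, r) := by
        simp [stepA, hvi, hx]
      rw [hstep]
      rw [stepA_zeros _ _ (fun i hi => by
        have hge : (done ++ [x]).length ≤ i := by
          have := List.mem_range'.mp hi; simp; omega
        have he : done ++ [x] ++ List.replicate (z' + 1) 0
            = (done ++ [x]) ++ List.replicate (z' + 1) 0 := by simp
        simpa [he] using getD_append_zeros (done ++ [x]) (z' + 1) i hge)]
      simp [mergeB]
  | case3 x t ih =>
    -- merge case: the two leading tiles are equal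
    intro done z r hnz
    have hx : x ≠ 0 := hnz x (by simp)
    have hvi : ((done ++ (x :: x :: t) ++ List.replicate z 0).getD done.length 0) = x := by
      rw [List.getD_eq_getElem?_getD, List.append_assoc,
          List.getElem?_append_right (le_refl _)]
      simp
    have hvj : ((done ++ (x :: x :: t) ++ List.replicate z 0).getD (done.length + 1) 0) = x := by
      have h1 : done ++ (x :: x :: t) ++ List.replicate z 0
          = (done ++ [x]) ++ (x :: (t ++ List.replicate z 0)) := by simp
      rw [h1, List.getD_eq_getElem?_getD,
          List.getElem?_append_right (by simp)]
      simp
    rw [List.getD_eq_getElem?_getD] at hvi hvj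
    have hc : (x :: x :: t).length + z - 1 = (t.length + (z + 1) - 1) + 1 := by
      simp; omega
    rw [hc, List.range'_succ, List.foldl_cons]
    have htake : (done ++ (x :: x :: t) ++ List.replicate z 0).take done.length = done := by
      rw [List.append_assoc, List.take_left]
    have hdrop : (done ++ (x :: x :: t) ++ List.replicate z 0).drop (done.length + 2)
        = t ++ List.replicate z 0 := by
      have h1 : done ++ (x :: x :: t) ++ List.replicate z 0
          = (done ++ [x, x]) ++ (t ++ List.replicate z 0) := by simp
      have h2 : done.length + 2 = (done ++ [x, x]).length := by simp
      rw [h1, h2, List.drop_left]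
    have hstep : stepA (done ++ (x :: x :: t) ++ List.replicate z 0, r) done.length
        = ((done ++ [x * 2]) ++ t ++ List.replicate (z + 1) 0, r + x * 2) := by
      simp only [stepA, List.getD_eq_getElem?_getD, hvi, hvj]
      rw [if_pos ⟨hx, trivial⟩, htake, hdrop]
      simp [List.replicate_succ' (n := z)]
    rw [hstep]
    have hlen : (done ++ [x * 2]).length = done.length + 1 := by simp
    have hIH := ih (done ++ [x * 2]) (z + 1) (r + x * 2)
      (fun a ha => hnz a (by simp [ha]))
    rw [hlen] at hIH
    rw [hIH]
    simp only [mergeB, if_true, Prod.mk.injEq]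
    constructor
    · simp only [List.append_assoc, List.cons_append, List.nil_append]
      congr 2
      congr 1
      simp; omega
    · ring
  | case4 x y t hne ih =>
    -- no-merge case: x ≠ y
    intro done z r hnz
    have hx : x ≠ 0 := hnz x (by simp)
    have hvi : ((done ++ (x :: y :: t) ++ List.replicate z 0).getD done.length 0) = x := by
      rw [List.getD_eq_getElem?_getD, List.append_assoc,
          List.getElem?_append_right (le_refl _)]
      simp
    have hvj : ((done ++ (x :: y :: t) ++ List.replicate z 0).getD (done.length + 1) 0) = y := by
      have h1 : done ++ (x :: y :: t) ++ List.replicate z 0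
          = (done ++ [x]) ++ (y :: (t ++ List.replicate z 0)) := by simp
      rw [h1, List.getD_eq_getElem?_getD,
          List.getElem?_append_right (by simp)]
      simp
    rw [List.getD_eq_getElem?_getD] at hvi hvj
    have hc : (x :: y :: t).length + z - 1 = ((y :: t).length + z - 1) + 1 := by
      simp; omega
    rw [hc, List.range'_succ, List.foldl_cons]
    have hstep : stepA (done ++ (x :: y :: t) ++ List.replicate z 0, r) done.length
        = ((done ++ [x]) ++ (y :: t) ++ List.replicate z 0, r) := by
      simp only [stepA, List.getD_eq_getElem?_getD, hvi, hvj]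
      rw [if_neg (by intro h; exact hne h.2)]
      simp
    rw [hstep]
    have hlen : (done ++ [x]).length = done.length + 1 := by simp
    have hIH := ih (done ++ [x]) z r (fun a ha => hnz a (by simp [ha]))
    rw [hlen] at hIH
    rw [hIH]
    simp only [mergeB, if_neg hne]
    simp [List.append_assoc]
    omega

-- the score component of push_row is the greedy-merge score of the nonzero tiles
lemma pushRowA_score (row : List Int) (left : Bool) :
    (pushRowA row left).2
      = (mergeB ((if left then row else row.reverse).filter (· != 0))).2 := by
  have hnz : ∀ x ∈ ((if left then row else row.reverse).filter (· != 0)), x ≠ 0 := by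
    intro x hx
    have := List.of_mem_filter hx
    simpa using this
  have h := stepA_loop ((if left then row else row.reverse).filter (· != 0)) [] 0 0 hnz
  simp only [List.nil_append, List.length_nil, List.replicate_zero, List.append_nil,
    Nat.add_zero] at h
  simp only [pushRowA, List.range_eq_range', h]
  ring

-- writing column i leaves every other column's values unchanged
lemma setCol_preserve (g : List (List Int)) (i j : Nat) (hne : j ≠ i) (new : List Int) :
    (g.mapIdx (fun r row => row.set i (new.getD r 0))).map (fun row => row.getD j 0)
      = g.map (fun row => row.getD j 0) := by
  apply List.ext_getElem
  · simp
  · intro k h1 h2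
    simp only [List.getElem_map, List.getElem_mapIdx]
    rw [List.getD_eq_getElem?_getD, List.getD_eq_getElem?_getD,
        List.getElem?_set_ne (by omega)]
    rw [← List.getD_eq_getElem?_getD]

-- generic column fold: a step that writes only column i and adds F of column i
-- sums F over the original grid's columns, for distinct indices
lemma foldl_col_score (F : List Int → Int)
    (step : List (List Int) × Int → Nat → List (List Int) × Int)
    (hstep : ∀ g r i, (step (g, r) i).2 = r + F (g.map (fun row => row.getD i 0)) ∧
      ∀ j, j ≠ i → ((step (g, r) i).1).map (fun row => row.getD j 0)
          = g.map (fun row => row.getD j 0)) :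
    ∀ (l : List Nat), l.Nodup → ∀ (g : List (List Int)) (r : Int),
      (l.foldl step (g, r)).2
        = r + (l.map (fun i => F (g.map (fun row => row.getD i 0)))).sum := by
  intro l
  induction l with
  | nil => intro _ g r; simp
  | cons a t ih =>
    intro hnd g r
    have hnd' := hnd.of_cons
    have hna : a ∉ t := by
      simp [List.nodup_cons] at hnd; exact hnd.1
    rw [List.foldl_cons]
    obtain ⟨hsc, hpre⟩ := hstep g r a
    have hpair : step (g, r) a = ((step (g, r) a).1, (step (g, r) a).2) := rfl
    rw [hpair, ih hnd' _ _]
    rw [hsc]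
    have : (t.map (fun i => F ((step (g, r) a).1.map (fun row => row.getD i 0)))).sum
        = (t.map (fun i => F (g.map (fun row => row.getD i 0)))).sum := by
      congr 1
      apply List.map_congr_left
      intro i hi
      rw [hpre i (fun h => hna (h ▸ hi))]
    rw [this]
    simp [List.map_cons, List.sum_cons]
    ring

-- the length of a push_row result never matters for the score, but the write-back uses getD,
-- so both step functions satisfy the hypotheses of foldl_col_score directly

lemma push_all_columns_eq_sum (grid : List (List Int)) (up : Bool) :
    push_all_columns grid up
      = ((List.range grid.headI.length).map
          (fun i => (pushRowA (grid.map (fun row => row.getD i 0)) up).2)).sum := by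
  unfold push_all_columns
  have := foldl_col_score (fun col => (pushRowA col up).2)
    (fun st i =>
      let column := getColumnA st.1 i
      let nr := pushRowA column up
      (setColumnA st.1 i nr.1, st.2 + nr.2))
    (by
      intro g r i
      constructor
      · rfl
      · intro j hj
        exact setCol_preserve g i j hj _)
    (List.range grid.headI.length) (List.nodup_range) grid 0
  rw [this]
  simp

lemma push_all_columns_alt_eq_sum (grid : List (List Int)) (up : Bool) :
    push_all_columns_alt grid up
      = ((List.range grid.headI.length).map
          (fun i => (mergeB ((if up then (grid.map (fun row => row.getD i 0))
              else (grid.map (fun row => row.getD i 0)).reverse).filter (· != 0))).2)).sum := by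
  unfold push_all_columns_alt
  have := foldl_col_score
    (fun col => (mergeB ((if up then col else col.reverse).filter (· != 0))).2)
    (fun st c =>
      let vals := st.1.map (fun row => row.getD c 0)
      let vals := if up then vals else vals.reverse
      let nz := vals.filter (· != 0)
      let m := mergeB nz
      let out := m.1 ++ List.replicate (st.1.length - m.1.length) 0
      let out := if up then out else out.reverse
      (st.1.mapIdx (fun r row => row.set c (out.getD r 0)), st.2 + m.2))
    (by
      intro g r i
      constructor
      · rfl
      · intro j hj
        exact setCol_preserve g i j hj _)
    (List.range grid.headI.length) (List.nodup_range) grid 0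
  rw [this]
  simp

-- ===== VERDICT (by name: the statement is the Claim_ definition above) =====
theorem push_all_columns_spec : Claim_equal_push_all_columns := by
  intro grid up _ _
  unfold Spec_push_all_columns
  rw [push_all_columns_eq_sum, push_all_columns_alt_eq_sum]
  congr 1
  apply List.map_congr_left
  intro i _
  exact pushRowA_score _ up
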